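-- pv_equiv track=rewrite | github.com/jemg2030/Retos-Python-CheckIO | DROPBOX/SortSortedGroups.py | sorted_groups
-- ===== SOURCE A (Python) =====
-- def sorted_groups(items: list[int]) -> list[int]:
--     # your code here
--     groups = []
--     current_group = []
--
--     # recorrer la lista
--     for i in range(len(items)):
--         # si el elemento actual es igual al elemento anterior, agregarlo al grupo actual
--         if i > 0 and items[i] == items[i - 1]:
--             current_group.append(items[i])
--         # si el elemento actual es diferente al elemento anterior, agregar el grupo actual a la lista de grupos
--         else:
--             if current_group:
--                 groups.append(current_group)
--             # crear un nuevo grupo con el elemento actual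
--             current_group = [items[i]]
--     # agregar el último grupo a la lista de grupos
--     if current_group:
--         groups.append(current_group)
--
--     # ordenar los grupos y concatenarlos en una lista ordenada
--     sorted_items = [elem for group in sorted(groups, key=len) for elem in group]
--
--     return sorted_items
-- ===== SOURCE B (Python) =====
-- def sorted_groups(items: list[int]) -> list[int]:
--     # Run-length encode the list, then counting-sort the runs by length:
--     # emit runs bucketed by count 1..maxlen, preserving traversal order within a bucket.
--     runs = []
--     cur = None  # (value, count) of the run being read
--     for x in items:
--         if cur is not None and cur[0] == x:
--             cur = (x, cur[1] + 1)
--         else: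
--             if cur is not None:
--                 runs.append(cur)
--             cur = (x, 1)
--     if cur is not None:
--         runs.append(cur)
--     maxlen = 0
--     for _, c in runs:
--         if c > maxlen:
--             maxlen = c
--     out = []
--     for l in range(1, maxlen + 1):
--         for v, c in runs:
--             if c == l:
--                 out.extend([v] * c)
--     return out
-- ===== Notes on version B (the rewrite author's own statement) =====
-- stated objective: alternative
-- what changed: B run-length encodes the list into (value,count) pairs instead of building group lists by index comparison, and replaces sorted(key=len) by a counting/bucket pass that emits runs of length 1..maxlen in traversal order (stable).
import Mathlib
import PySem

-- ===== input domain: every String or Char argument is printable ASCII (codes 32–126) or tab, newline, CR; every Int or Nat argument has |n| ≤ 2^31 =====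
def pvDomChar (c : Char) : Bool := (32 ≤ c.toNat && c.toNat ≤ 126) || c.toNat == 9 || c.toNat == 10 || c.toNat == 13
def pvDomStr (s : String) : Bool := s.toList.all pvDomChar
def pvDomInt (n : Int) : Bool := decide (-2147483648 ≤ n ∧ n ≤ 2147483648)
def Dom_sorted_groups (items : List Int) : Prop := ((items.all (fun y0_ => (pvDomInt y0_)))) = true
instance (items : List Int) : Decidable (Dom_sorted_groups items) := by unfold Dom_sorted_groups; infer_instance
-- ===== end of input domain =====

-- B run-length encodes the list into (value,count) runs and emits them with a stable
-- counting/bucket pass over lengths 1..maxlen, instead of A's index-based grouping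
-- followed by sorted(key=len); proved to return the same list on every input.

-- ===== PORT A =====
def sorted_groups (items : List Int) : List Int :=
  let st := (PySem.List.pyRange 0 (items.length : Int) 1).foldl
    (fun (st : List (List Int) × List Int) (i : Int) =>
      if 0 < i ∧ PySem.List.pyGetD items i 0 = PySem.List.pyGetD items (i - 1) 0 then
        (st.1, st.2 ++ [PySem.List.pyGetD items i 0])
      else
        ((if st.2 ≠ [] then st.1 ++ [st.2] else st.1), [PySem.List.pyGetD items i 0]))
    ([], [])
  let groups := if st.2 ≠ [] then st.1 ++ [st.2] else st.1
  (PySem.List.sorted groups (fun g => g.length)).flatMap (fun g => g)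

-- ===== PORT B =====
def sorted_groups_alt (items : List Int) : List Int :=
  let st := items.foldl
    (fun (st : List (Int × Nat) × Option (Int × Nat)) x =>
      match st.2 with
      | some (v, c) =>
          if v = x then (st.1, some (x, c + 1))
          else (st.1 ++ [(v, c)], some (x, 1))
      | none => (st.1, some (x, 1)))
    ([], none)
  let runs := match st.2 with
    | some vc => st.1 ++ [vc]
    | none => st.1
  let maxlen : Nat := runs.foldl (fun m vc => if vc.2 > m then vc.2 else m) 0
  (PySem.List.pyRange 1 ((maxlen : Int) + 1) 1).foldl
    (fun out l => runs.foldl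
      (fun out vc => if (vc.2 : Int) = l then out ++ List.replicate vc.2 vc.1 else out) out)
    []

-- ===== PRECONDITION & SPEC =====
def Spec_sorted_groups (items : List Int) (out : List Int) : Prop := out = sorted_groups_alt items
instance (items : List Int) (out : List Int) : Decidable (Spec_sorted_groups items out) := by unfold Spec_sorted_groups; infer_instance

-- ===== CLAIM (what is proved, stated in full; the proofs are below) =====
def Claim_equal_sorted_groups : Prop := ∀ (items : List Int), Dom_sorted_groups items → Spec_sorted_groups items (sorted_groups items)

-- ===== LEMMAS AND PROOFS =====


def pvRep (vc : Int × Nat) : List Int := List.replicate vc.2 vc.1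
def pvRepO : Option (Int × Nat) → List Int
  | none => []
  | some vc => pvRep vc

def pvBodyA (items : List Int) (st : List (List Int) × List Int) (i : Int) :
    List (List Int) × List Int :=
  if 0 < i ∧ PySem.List.pyGetD items i 0 = PySem.List.pyGetD items (i - 1) 0 then
    (st.1, st.2 ++ [PySem.List.pyGetD items i 0])
  else
    ((if st.2 ≠ [] then st.1 ++ [st.2] else st.1), [PySem.List.pyGetD items i 0])

def pvBodyB (st : List (Int × Nat) × Option (Int × Nat)) (x : Int) :
    List (Int × Nat) × Option (Int × Nat) :=
  match st.2 with
  | some (v, c) => if v = x then (st.1, some (x, c + 1)) else (st.1 ++ [(v, c)], some (x, 1))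
  | none => (st.1, some (x, 1))

def pvStA (items : List Int) : List (List Int) × List Int :=
  (PySem.List.pyRange 0 (items.length : Int) 1).foldl (pvBodyA items) ([], [])

def pvStB (items : List Int) : List (Int × Nat) × Option (Int × Nat) :=
  items.foldl pvBodyB ([], none)

theorem pvGroupInv (ys : List Int) :
    (pvStA ys).1 = (pvStB ys).1.map pvRep ∧ (pvStA ys).2 = pvRepO (pvStB ys).2 ∧
    ((pvStB ys).2 = none ↔ ys = []) ∧
    (∀ v c, (pvStB ys).2 = some (v, c) → ys.getLast? = some v ∧ 1 ≤ c) ∧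
    (∀ r ∈ (pvStB ys).1, 1 ≤ r.2) := by
  induction ys using List.reverseRecOn with
  | nil =>
    simp [pvStA, pvStB, PySem.List.pyRange, pvRepO]
  | append_singleton ys x ih =>
    obtain ⟨ih1, ih2, ih3, ih4, ih5⟩ := ih
    have hB : pvStB (ys ++ [x]) = pvBodyB (pvStB ys) x := by
      rw [pvStB, pvStB, List.foldl_append]; rfl
    have hlen : ((ys ++ [x]).length : Int) = ((ys.length + 1 : Nat) : Int) := by simp
    have hA : pvStA (ys ++ [x]) = pvBodyA (ys ++ [x]) (pvStA ys) (ys.length : Int) := by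
      rw [pvStA, hlen, PySem.List.pyRange_zero_natCast, List.foldl_map, List.range_succ,
        List.foldl_append, List.foldl_cons, List.foldl_nil]
      congr 1
      rw [pvStA, PySem.List.pyRange_zero_natCast, List.foldl_map]
      apply List.foldl_ext
      intro st k hk
      have hk' : k < ys.length := List.mem_range.mp hk
      unfold pvBodyA
      have e1 : PySem.List.pyGetD (ys ++ [x]) (k : Int) 0 = PySem.List.pyGetD ys (k : Int) 0 := by
        rw [PySem.List.pyGetD_natCast, PySem.List.pyGetD_natCast, List.getD_append _ _ _ _ hk']
      by_cases h0 : 0 < k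
      · have ek : ((k : Int) - 1) = ((k - 1 : Nat) : Int) := by omega
        have e2 : PySem.List.pyGetD (ys ++ [x]) ((k : Int) - 1) 0 = PySem.List.pyGetD ys ((k : Int) - 1) 0 := by
          rw [ek, PySem.List.pyGetD_natCast, PySem.List.pyGetD_natCast,
            List.getD_append _ _ _ _ (by omega)]
        rw [e1, e2]
      · have hk0 : k = 0 := by omega
        subst hk0
        rw [e1]
        norm_num
    rw [hA, hB]
    have egetx : PySem.List.pyGetD (ys ++ [x]) (ys.length : Int) 0 = x := by
      rw [PySem.List.pyGetD_natCast]
      simp [List.getD]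
    cases hys : ys with
    | nil =>
      subst hys
      unfold pvBodyA pvBodyB
      simp only [pvStA, pvStB, PySem.List.pyRange, List.foldl_nil] at *
      simp [pvRepO, pvRep]
    | cons hd tl =>
      rw [← hys]
      have hne : ys ≠ [] := by rw [hys]; simp
      have h0 : (0 : Int) < (ys.length : Int) := by
        have : 0 < ys.length := List.length_pos_iff.mpr hne
        omega
      obtain ⟨⟨v, c⟩, hv⟩ : ∃ vc : Int × Nat, (pvStB ys).2 = some vc := by
        cases h : (pvStB ys).2 with
        | none => exact absurd (ih3.mp h) hne
        | some vc => exact ⟨vc, rfl⟩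
      obtain ⟨hlast, hc⟩ := ih4 v c hv
      have egetprev : PySem.List.pyGetD (ys ++ [x]) ((ys.length : Int) - 1) 0 = v := by
        have ek : ((ys.length : Int) - 1) = ((ys.length - 1 : Nat) : Int) := by omega
        rw [ek, PySem.List.pyGetD_natCast, List.getD_append _ _ _ _ (by omega)]
        rw [List.getLast?_eq_getElem?] at hlast
        simp [List.getD, hlast]
      have hcur : (pvStA ys).2 = List.replicate c v := by
        rw [ih2, hv]; rfl
      unfold pvBodyA pvBodyB
      rw [hv, egetx, egetprev, hcur]
      dsimp only
      by_cases hxv : x = v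
      · subst hxv
        rw [if_pos ⟨h0, rfl⟩, if_pos rfl]
        refine ⟨by simpa using ih1, ?_, by simp, ?_, by simpa using ih5⟩
        · simp [pvRepO, pvRep, ← List.replicate_succ']
        · intro v' c' hv'
          simp only [Option.some.injEq, Prod.mk.injEq] at hv'
          exact ⟨by simp [← hv'.1], by omega⟩
      · have hcond : ¬ ((0:Int) < (ys.length : Int) ∧ x = v) := fun hh => hxv hh.2
        have hvx : ¬ (v = x) := fun h => hxv h.symm
        have hrep : List.replicate c v ≠ [] := by
          simp only [ne_eq, List.replicate_eq_nil_iff]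
          omega
        rw [if_neg hcond, if_neg hvx, if_pos hrep]
        refine ⟨?_, by simp [pvRepO, pvRep], by simp, ?_, ?_⟩
        · simp [ih1, pvRep]
        · intro v' c' hv'
          simp only [Option.some.injEq, Prod.mk.injEq] at hv'
          exact ⟨by simp [← hv'.1], by omega⟩
        · intro r hr
          simp only [List.mem_append, List.mem_singleton] at hr
          rcases hr with hr | hr
          · exact ih5 r hr
          · subst hr; exact hc


theorem pvInsertBy_append_left {α : Type} (bef : α → α → Bool) (x : α) (as bs : List α)
    (h : ∀ y ∈ as, bef x y = false) :
    PySem.List.insertBy bef x (as ++ bs) = as ++ PySem.List.insertBy bef x bs := by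
  induction as with
  | nil => simp
  | cons a t ih =>
    have ha : bef x a = false := h a (by simp)
    simp [PySem.List.insertBy, ha]
    exact ih (fun y hy => h y (by simp [hy]))

theorem pvBuckets (rs : List (Int × Nat)) (M : Nat) (h : ∀ r ∈ rs, 1 ≤ r.2 ∧ r.2 ≤ M) :
    PySem.List.sorted rs (fun r => r.2) false =
      (List.range' 1 M).flatMap (fun l => rs.filter (fun r => r.2 = l)) := by
  induction rs using List.reverseRecOn with
  | nil => simp [PySem.List.sorted_eq_foldl_insertBy]
  | append_singleton rs r ih =>
    obtain ⟨h1, h2⟩ := h r (by simp)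
    have hrs : ∀ x ∈ rs, 1 ≤ x.2 ∧ x.2 ≤ M := fun x hx => h x (by simp [hx])
    rw [PySem.List.sorted_eq_foldl_insertBy, List.foldl_append, ← PySem.List.sorted_eq_foldl_insertBy, ih hrs]
    simp only [List.foldl_cons, List.foldl_nil]
    have hcM : r.2 + (M - r.2) = M := by omega
    have hsplit : List.range' 1 M = List.range' 1 r.2 ++ List.range' (1 + r.2) (M - r.2) := by
      calc List.range' 1 M = List.range' 1 (r.2 + (M - r.2)) := by rw [hcM]
        _ = _ := List.range'_append_1.symm
    rw [hsplit]
    simp only [List.flatMap_append]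
    set P := (List.range' 1 r.2).flatMap (fun l => rs.filter (fun x => x.2 = l)) with hP
    set Q := (List.range' (1 + r.2) (M - r.2)).flatMap (fun l => rs.filter (fun x => x.2 = l)) with hQ
    have hPle : ∀ y ∈ P, (decide ((fun x : Int × Nat => x.2) r < (fun x : Int × Nat => x.2) y) : Bool) = false := by
      intro y hy
      rw [hP] at hy
      simp only [List.mem_flatMap, List.mem_filter, List.mem_range'] at hy
      obtain ⟨l, hl, _, hyl⟩ := hy
      have : y.2 = l := by simpa using hyl
      simp only [decide_eq_false_iff_not, not_lt]
      omega
    rw [pvInsertBy_append_left _ _ _ _ hPle]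
    have hQgt : PySem.List.insertBy (fun a b => decide ((fun x : Int × Nat => x.2) a < (fun x : Int × Nat => x.2) b)) r Q = r :: Q := by
      cases hq : Q with
      | nil => simp [PySem.List.insertBy]
      | cons q t =>
        have hqmem : q ∈ Q := by rw [hq]; simp
        rw [hQ] at hqmem
        simp only [List.mem_flatMap, List.mem_filter, List.mem_range'] at hqmem
        obtain ⟨l, hl, _, hql⟩ := hqmem
        have hq2 : q.2 = l := by simpa using hql
        have hlt : r.2 < q.2 := by omega
        simp [PySem.List.insertBy, hlt]
    rw [hQgt]
    have hfilter : ∀ l : Nat, (rs ++ [r]).filter (fun x => x.2 = l) =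
        rs.filter (fun x => x.2 = l) ++ if r.2 = l then [r] else [] := by
      intro l
      rw [List.filter_append]
      congr 1
      by_cases hcl : r.2 = l <;> simp [List.filter, hcl]
    simp only [hfilter]
    have hc1 : r.2 = (r.2 - 1) + 1 := by omega
    have hsplit2 : List.range' 1 r.2 = List.range' 1 (r.2-1) ++ [r.2] := by
      conv_lhs => rw [hc1]
      rw [← List.range'_append_1]
      congr 1 <;> simp <;> omega
    rw [hsplit2]
    simp only [List.flatMap_append, List.flatMap_cons, List.flatMap_nil, List.append_nil]
    have e1 : (List.range' 1 (r.2-1)).flatMap (fun l => rs.filter (fun x => x.2 = l) ++ if r.2 = l then [r] else [])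
        = (List.range' 1 (r.2-1)).flatMap (fun l => rs.filter (fun x => x.2 = l)) := by
      apply List.flatMap_congr
      intro l hl
      simp only [List.mem_range'] at hl
      have : ¬ (r.2 = l) := by omega
      simp [this]
    have e3 : (List.range' (1+r.2) (M-r.2)).flatMap (fun l => rs.filter (fun x => x.2 = l) ++ if r.2 = l then [r] else [])
        = Q := by
      rw [hQ]
      apply List.flatMap_congr
      intro l hl
      simp only [List.mem_range'] at hl
      have : ¬ (r.2 = l) := by omega
      simp [this]
    rw [e1, e3]
    simp only [if_true]
    rw [hP, hsplit2]
    simp [List.flatMap_append]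


theorem pvInsertBy_map {α β : Type} (f : α → β) (bef : β → β → Bool) (x : α) (acc : List α) :
    PySem.List.insertBy bef (f x) (acc.map f) =
      (PySem.List.insertBy (fun a b => bef (f a) (f b)) x acc).map f := by
  induction acc with
  | nil => simp [PySem.List.insertBy]
  | cons a t ih =>
    by_cases h : bef (f x) (f a)
    · simp [PySem.List.insertBy, h]
    · simp only [List.map_cons, PySem.List.insertBy]
      simp [h, ih]

theorem pvSorted_map {α β : Type} (xs : List α) (f : α → β) (key : β → Nat) :
    PySem.List.sorted (xs.map f) key false =
      (PySem.List.sorted xs (fun a => key (f a)) false).map f := by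
  rw [PySem.List.sorted_eq_foldl_insertBy, PySem.List.sorted_eq_foldl_insertBy, List.foldl_map]
  suffices h : ∀ acc : List α,
      xs.foldl (fun acc x => PySem.List.insertBy (fun a b => decide (key a < key b)) (f x) acc) (acc.map f)
        = (xs.foldl (fun acc x => PySem.List.insertBy (fun a b => decide (key (f a) < key (f b))) x acc) acc).map f by
    simpa using h []
  induction xs with
  | nil => intro acc; simp
  | cons y t ih =>
    intro acc
    simp only [List.foldl_cons]
    rw [pvInsertBy_map f (fun a b => decide (key a < key b)) y acc]
    exact ih _


theorem pvPyRangeNat (a n : Nat) :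
    PySem.List.pyRange (a : Int) ((a : Int) + (n : Int)) 1 =
      (List.range' a n).map (fun k => Int.ofNat k) := by
  induction n generalizing a with
  | zero => simp [PySem.List.pyRange]
  | succ m ih =>
    rw [PySem.List.pyRange_one_cons (by push_cast; omega)]
    have : ((a : Int) + 1) = ((a + 1 : Nat) : Int) := by push_cast; ring
    rw [this]
    have h2 : ((a : Int) + ((m + 1 : Nat) : Int)) = ((a+1 : Nat) : Int) + (m : Nat) := by push_cast; ring
    rw [h2, ih (a+1)]
    simp [List.range'_succ, Int.ofNat_eq_natCast]

theorem pvPyRangeNat' (M : Nat) :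
    PySem.List.pyRange 1 ((M : Int) + 1) 1 = (List.range' 1 M).map (fun k => Int.ofNat k) := by
  have h := pvPyRangeNat 1 M
  have e : ((1 : Nat) : Int) = 1 := by norm_num
  rw [e] at h
  have e2 : (M : Int) + 1 = 1 + (M : Int) := by ring
  rw [e2]
  exact h

theorem pvInnerFold (l : Nat) (rs : List (Int × Nat)) :
    ∀ (out : List Int),
      rs.foldl (fun out vc => if (vc.2 : Int) = Int.ofNat l then out ++ List.replicate vc.2 vc.1 else out) out
        = out ++ (rs.filter (fun r => r.2 = l)).flatMap pvRep := by
  induction rs with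
  | nil => intro out; simp
  | cons r t ih =>
    intro out
    simp only [List.foldl_cons]
    by_cases h : r.2 = l
    · have h' : ((r.2 : Int) = Int.ofNat l) := by
        rw [Int.ofNat_eq_natCast]; exact_mod_cast h
      rw [if_pos h', ih, List.filter_cons_of_pos (by simpa using h)]
      simp [pvRep, List.append_assoc]
    · have h' : ¬((r.2 : Int) = Int.ofNat l) := by
        rw [Int.ofNat_eq_natCast]; exact_mod_cast h
      rw [if_neg h', ih, List.filter_cons_of_neg (by simpa using h)]

theorem pvOuter (rs : List (Int × Nat)) :
    ∀ (L : List Nat) (acc : List Int),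
    List.foldl
      (fun out (l : Int) => rs.foldl
        (fun out vc => if (vc.2 : Int) = l then out ++ List.replicate vc.2 vc.1 else out) out)
      acc (L.map (fun k => Int.ofNat k))
    = acc ++ L.flatMap (fun l => (rs.filter (fun r => r.2 = l)).flatMap pvRep) := by
  intro L
  induction L with
  | nil => intro acc; simp
  | cons k t ih =>
    intro acc
    simp only [List.map_cons, List.foldl_cons, List.flatMap_cons]
    rw [pvInnerFold k rs acc, ih, List.append_assoc]

theorem pvMain (items : List Int) : sorted_groups items = sorted_groups_alt items := by
  obtain ⟨i1, i2, i3, i4, i5⟩ := pvGroupInv items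
  -- the final run list and max length
  set runsF : List (Int × Nat) := (match (pvStB items).2 with
    | some vc => (pvStB items).1 ++ [vc]
    | none => (pvStB items).1) with hrunsF
  set maxl : Nat := runsF.foldl (fun m vc => if vc.2 > m then vc.2 else m) 0 with hmaxl
  have hA0 : sorted_groups items =
      (PySem.List.sorted (if (pvStA items).2 ≠ [] then (pvStA items).1 ++ [(pvStA items).2]
          else (pvStA items).1) (fun g => g.length) false).flatMap (fun g => g) := rfl
  have hB0 : sorted_groups_alt items =
      (PySem.List.pyRange 1 ((maxl : Int) + 1) 1).foldl
        (fun out l => runsF.foldl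
          (fun out vc => if (vc.2 : Int) = l then out ++ List.replicate vc.2 vc.1 else out) out)
        [] := by rw [hmaxl, hrunsF]; unfold sorted_groups_alt pvStB pvBodyB; rfl
  -- A's group list is the run list under pvRep
  have hgroups : (if (pvStA items).2 ≠ [] then (pvStA items).1 ++ [(pvStA items).2]
      else (pvStA items).1) = runsF.map pvRep := by
    rw [hrunsF]
    cases h : (pvStB items).2 with
    | none =>
      have h2 : (pvStA items).2 = [] := by rw [i2, h]; rfl
      simp [h2, i1]
    | some vc =>
      obtain ⟨v, c⟩ := vc
      obtain ⟨_, hc⟩ := i4 v c h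
      have h2 : (pvStA items).2 = List.replicate c v := by rw [i2, h]; rfl
      have hne : (pvStA items).2 ≠ [] := by
        rw [h2]; simp only [ne_eq, List.replicate_eq_nil_iff]; omega
      rw [if_pos hne, i1, h2]
      simp [pvRep]
  -- every run has count in [1, maxl]
  have hcounts : ∀ r ∈ runsF, 1 ≤ r.2 := by
    rw [hrunsF]
    cases h : (pvStB items).2 with
    | none => exact i5
    | some vc =>
      obtain ⟨v, c⟩ := vc
      intro r hr
      rcases List.mem_append.mp hr with hr | hr
      · exact i5 r hr
      · have : r = (v, c) := by simpa using hr
        subst this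
        exact (i4 v c h).2
  have hmaxbody : ∀ (rs : List (Int × Nat)) (m : Nat),
      rs.foldl (fun m vc => if vc.2 > m then vc.2 else m) m
        = rs.foldl (fun acc y => max acc (y.2)) m := by
    intro rs m
    apply List.foldl_ext
    intro a b _
    simp only [gt_iff_lt]
    split_ifs with hh <;> omega
  have hmax : ∀ r ∈ runsF, r.2 ≤ maxl := by
    intro r hr
    rw [hmaxl, hmaxbody]
    exact (PySem.List.le_foldl_max_nat runsF (fun y => y.2) 0).2 r hr
  -- A side: stable sort by length = bucket concatenation
  have hkey : (fun a : Int × Nat => (pvRep a).length) = (fun a : Int × Nat => a.2) := by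
    funext a; simp [pvRep]
  have hAside : sorted_groups items
      = (List.range' 1 maxl).flatMap (fun l => (runsF.filter (fun r => r.2 = l)).flatMap pvRep) := by
    rw [hA0, hgroups, pvSorted_map runsF pvRep (fun g => g.length), hkey,
      pvBuckets runsF maxl (fun r hr => ⟨hcounts r hr, hmax r hr⟩)]
    have : ∀ (L : List (Int × Nat)), ((L.map pvRep).flatMap (fun g => g)) = L.flatMap pvRep := by
      intro L; simp; rfl
    rw [this, List.flatMap_assoc]
  -- B side: the counting pass computes the same bucket concatenation
  have hBside : sorted_groups_alt items
      = (List.range' 1 maxl).flatMap (fun l => (runsF.filter (fun r => r.2 = l)).flatMap pvRep) := by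
    rw [hB0, pvPyRangeNat' maxl, pvOuter runsF (List.range' 1 maxl) []]
    simp
  rw [hAside, hBside]

-- ===== VERDICT (by name: the statement is the Claim_ definition above) =====
theorem sorted_groups_spec : Claim_equal_sorted_groups := by
  intro items _
  unfold Spec_sorted_groups
  exact pvMain items
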